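-- pv_equiv track=rewrite | github.com/sumeyaali/Code_Challenges | Intro/matrixElementsSums.py | matrixElementsSum
-- ===== SOURCE A (Python) =====
-- def matrixElementsSum(matrix):
--     sum = 0
--     bannedIndex = []
--
--     for i in range(len(matrix)):
--         for j in range(len(matrix[i])):
--             if matrix[i][j] == 0:
--                 bannedIndex.append(j)
--             elif j not in bannedIndex:
--                 sum += matrix[i][j]
--     return sum
-- ===== SOURCE B (Python) =====
-- def matrixElementsSum(matrix):
--     width = max((len(row) for row in matrix), default=0)
--     return sum(_column_sum(matrix, j) for j in range(width))
--
-- def _column_sum(matrix, j):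
--     s = 0
--     for row in matrix:
--         if j < len(row):
--             v = row[j]
--             if v == 0:
--                 break
--             s += v
--     return s
-- ===== Notes on version B (the rewrite author's own statement) =====
-- stated objective: simpler
-- what changed: Replaces A's row-major scan that maintains a growing bannedIndex list (with a linear membership test per element) by a column-major scan that simply breaks at the first zero in each column, dropping the banned-column state entirely.
import Mathlib
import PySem

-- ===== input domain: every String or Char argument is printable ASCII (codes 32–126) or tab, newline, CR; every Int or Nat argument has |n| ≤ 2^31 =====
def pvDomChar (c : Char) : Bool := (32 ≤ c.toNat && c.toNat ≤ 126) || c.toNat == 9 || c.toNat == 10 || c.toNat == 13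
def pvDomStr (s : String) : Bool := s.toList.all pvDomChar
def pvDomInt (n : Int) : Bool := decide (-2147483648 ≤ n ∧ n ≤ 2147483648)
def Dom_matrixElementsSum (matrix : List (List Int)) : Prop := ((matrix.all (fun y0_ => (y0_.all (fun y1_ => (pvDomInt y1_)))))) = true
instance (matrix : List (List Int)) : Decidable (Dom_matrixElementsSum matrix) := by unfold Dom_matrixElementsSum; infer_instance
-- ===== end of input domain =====

-- B replaces A's row-major scan with a banned-column list by a column-major scan that
-- breaks at the first zero of each column (objective: simpler — no banned-index state).

-- ===== PORT A =====
-- literal port of A: row-major double loop over indices i, j with state (sum, bannedIndex)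
def matrixElementsSum (matrix : List (List Int)) : Int :=
  ((PySem.List.pyRange 0 (matrix.length : Int) 1).foldl
    (fun (st : Int × List Int) i =>
      let row := PySem.List.pyGetD matrix i []
      (PySem.List.pyRange 0 (row.length : Int) 1).foldl
        (fun (st : Int × List Int) j =>
          let v := PySem.List.pyGetD row j 0
          if v = 0 then (st.1, st.2 ++ [j])
          else if j ∉ st.2 then (st.1 + v, st.2)
          else st)
        st)
    ((0 : Int), ([] : List Int))).1

-- ===== PORT B =====
-- port of Source B's _column_sum: walk the rows top-down with accumulator s, skip rows
-- too short for column j, break (return s) at the first zero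
def pvColSum (matrix : List (List Int)) (j : Nat) (s : Int) : Int :=
  match matrix with
  | [] => s
  | row :: rest =>
      if h : j < row.length then
        if row[j] = 0 then s else pvColSum rest j (s + row[j])
      else pvColSum rest j s

def matrixElementsSum_alt (matrix : List (List Int)) : Int :=
  let width := matrix.foldl (fun w row => max w row.length) 0
  ((List.range width).map (fun j => pvColSum matrix j 0)).sum

-- ===== PRECONDITION & SPEC =====
def Spec_matrixElementsSum (matrix : List (List Int)) (out : Int) : Prop := out = matrixElementsSum_alt matrix
instance (matrix : List (List Int)) (out : Int) : Decidable (Spec_matrixElementsSum matrix out) := by unfold Spec_matrixElementsSum; infer_instance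

-- ===== CLAIM (what is proved, stated in full; the proofs are below) =====
def Claim_equal_matrixElementsSum : Prop := ∀ (matrix : List (List Int)), Dom_matrixElementsSum matrix → Spec_matrixElementsSum matrix (matrixElementsSum matrix)

-- ===== LEMMAS AND PROOFS =====

-- A's inner-loop body on state (sum, banned), column index j, value v
def pvBody (st : Int × List Int) (j : Int) (v : Int) : Int × List Int :=
  if v = 0 then (st.1, st.2 ++ [j])
  else if j ∉ st.2 then (st.1 + v, st.2)
  else st

-- structural form of A's inner loop over a row, at column offset n
def pvInner (row : List Int) (n : Nat) (st : Int × List Int) : Int × List Int :=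
  match row with
  | [] => st
  | v :: rest => pvInner rest (n + 1) (pvBody st (n : Int) v)

-- sum A adds while scanning row against banned list b (offset n)
def pvRowSum (b : List Int) (row : List Int) (n : Nat) : Int :=
  match row with
  | [] => 0
  | v :: rest => (if v ≠ 0 ∧ ((n : Int) ∉ b) then v else 0) + pvRowSum b rest (n + 1)

-- column indices (as Ints) that row appends to bannedIndex (offset n)
def pvRowBans (row : List Int) (n : Nat) : List Int :=
  match row with
  | [] => []
  | v :: rest => (if v = 0 then [(n : Int)] else []) ++ pvRowBans rest (n + 1)

-- A's whole computation, row-structurally, from banned list b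
def pvTotal (b : List Int) (rows : List (List Int)) : Int :=
  match rows with
  | [] => 0
  | row :: rest => pvRowSum b row 0 + pvTotal (b ++ pvRowBans row 0) rest

-- banning columns < n does not change the sum collected from offset n on
theorem pvRowSum_append_lt (row : List Int) (n : Nat) (b e : List Int)
    (he : ∀ x ∈ e, ∃ k, k < n ∧ x = (k : Int)) :
    pvRowSum (b ++ e) row n = pvRowSum b row n := by
  induction row generalizing n with
  | nil => rfl
  | cons v rest ih =>
      have hne : ((n : Int) ∈ b ++ e) ↔ ((n : Int) ∈ b) := by
        simp only [List.mem_append]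
        constructor
        · rintro (h | h)
          · exact h
          · rcases he _ h with ⟨k, hk, hx⟩
            exact absurd hx.symm (by exact_mod_cast Nat.ne_of_lt hk)
        · exact Or.inl
      simp only [pvRowSum, hne,
        ih (n + 1) (fun x hx => by
          rcases he x hx with ⟨k, hk, hx'⟩; exact ⟨k, Nat.lt_succ_of_lt hk, hx'⟩)]

theorem pvInner_eq (row : List Int) (n : Nat) (s : Int) (b : List Int) :
    pvInner row n (s, b) = (s + pvRowSum b row n, b ++ pvRowBans row n) := by
  induction row generalizing n s b with
  | nil => simp [pvInner, pvRowSum, pvRowBans]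
  | cons v rest ih =>
      show pvInner rest (n + 1) (pvBody (s, b) (n : Int) v)
        = (s + pvRowSum b (v :: rest) n, b ++ pvRowBans (v :: rest) n)
      by_cases hv : v = 0
      · have hstep : pvBody (s, b) (n : Int) v = (s, b ++ [(n : Int)]) := by
          simp [pvBody, hv]
        rw [hstep, ih,
          pvRowSum_append_lt rest (n + 1) b [(n : Int)]
            (by intro x hx; simp at hx; exact ⟨n, Nat.lt_succ_self n, hx⟩)]
        simp [pvRowSum, pvRowBans, hv]
      · by_cases hb : (n : Int) ∈ b
        · have hstep : pvBody (s, b) (n : Int) v = (s, b) := by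
            simp [pvBody, hv, hb]
          rw [hstep, ih]
          simp [pvRowSum, pvRowBans, hv, hb]
        · have hstep : pvBody (s, b) (n : Int) v = (s + v, b) := by
            simp [pvBody, hv, hb]
          rw [hstep, ih]
          simp [pvRowSum, pvRowBans, hv, hb, add_assoc]

-- A's index-based inner loop is the structural pvInner
theorem pvRangeFold_eq_pvInner (row : List Int) (n : Nat) (st : Int × List Int) :
    (List.range row.length).foldl
      (fun st k => pvBody st ((n + k : Nat) : Int) (row.getD k 0)) st
    = pvInner row n st := by
  induction row generalizing n st with
  | nil => rfl
  | cons v rest ih =>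
      simp only [List.length_cons, List.range_succ_eq_map, List.foldl_cons, List.foldl_map]
      simp only [List.getD_cons_zero, Nat.add_zero, pvInner]
      rw [← ih (n + 1) (pvBody st (n : Int) v)]
      refine PySem.List.foldl_congr_mem _ _ _ _ ?_
      intro acc k _
      have h1 : n + (k + 1) = n + 1 + k := by omega
      simp [Nat.succ_eq_add_one, h1]

-- every banned column of a row at offset n is some column index ≥ n
theorem pvRowBans_ge (row : List Int) (n : Nat) :
    ∀ x ∈ pvRowBans row n, ∃ k, n ≤ k ∧ x = (k : Int) := by
  induction row generalizing n with
  | nil => intro x hx; simp [pvRowBans] at hx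
  | cons v rest ih =>
      intro x hx
      simp only [pvRowBans, List.mem_append] at hx
      rcases hx with hx | hx
      · refine ⟨n, le_refl n, ?_⟩
        by_cases hv : v = 0 <;> simp [hv] at hx
        exact hx
      · rcases ih (n + 1) x hx with ⟨k, hk, hx'⟩
        exact ⟨k, by omega, hx'⟩

theorem mem_pvRowBans (row : List Int) (n k : Nat) :
    (((n + k : Nat) : Int) ∈ pvRowBans row n) ↔ (k < row.length ∧ row.getD k 0 = 0) := by
  induction row generalizing n k with
  | nil => simp [pvRowBans]
  | cons v rest ih =>
      simp only [pvRowBans, List.mem_append]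
      cases k with
      | zero =>
          simp only [Nat.add_zero, List.getD_cons_zero, List.length_cons]
          constructor
          · rintro (h | h)
            · by_cases hv : v = 0
              · exact ⟨Nat.succ_pos _, hv⟩
              · simp [hv] at h
            · rcases pvRowBans_ge rest (n + 1) _ h with ⟨m, hm, hx⟩
              have hnm : n = m := by exact_mod_cast hx
              exact absurd hnm (by omega)
          · rintro ⟨_, hv⟩
            left; simp [hv]
      | succ k' =>
          have h1 : n + (k' + 1) = (n + 1) + k' := by omega
          rw [h1]
          constructor
          · rintro (h | h)
            · by_cases hv : v = 0
              · simp [hv] at h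
                have h2 : n + 1 + k' = n := by exact_mod_cast h
                exact absurd h2 (by omega)
              · simp [hv] at h
            · have := (ih (n + 1) k').mp h
              simpa [Nat.succ_lt_succ_iff] using this
          · intro ⟨hlt, hz⟩
            right
            exact (ih (n + 1) k').mpr ⟨by simpa [Nat.succ_lt_succ_iff] using hlt, by simpa using hz⟩

-- pvRowSum as a sum over all column indices of the row
theorem pvRowSum_eq_sum (row : List Int) (n : Nat) (b : List Int) :
    pvRowSum b row n
    = ((List.range row.length).map
        (fun j => if row.getD j 0 ≠ 0 ∧ (((n + j : Nat) : Int) ∉ b) then row.getD j 0 else 0)).sum := by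
  induction row generalizing n with
  | nil => simp [pvRowSum]
  | cons v rest ih =>
      simp only [List.length_cons, List.range_succ_eq_map, List.map_cons,
        List.map_map, List.sum_cons]
      have hmap : ∀ j ∈ List.range rest.length,
          ((fun j => if (v :: rest).getD j 0 ≠ 0 ∧ (((n + j : Nat) : Int) ∉ b)
              then (v :: rest).getD j 0 else 0) ∘ Nat.succ) j
          = (fun j => if rest.getD j 0 ≠ 0 ∧ ((((n + 1) + j : Nat) : Int) ∉ b)
              then rest.getD j 0 else 0) j := by
        intro j _
        have h1 : n + (j + 1) = n + 1 + j := by omega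
        simp [Function.comp, Nat.succ_eq_add_one, h1]
      rw [List.map_congr_left hmap, ← ih (n + 1), pvRowSum]
      simp

-- padding the sum out to any W ≥ row.length adds only zeros (getD is 0 past the end)
theorem pvRowSum_eq_sum_W (row : List Int) (b : List Int) (W : Nat) (hW : row.length ≤ W) :
    pvRowSum b row 0
    = ((List.range W).map
        (fun j => if row.getD j 0 ≠ 0 ∧ (((j : Nat) : Int) ∉ b) then row.getD j 0 else 0)).sum := by
  have h0 : pvRowSum b row 0
      = ((List.range row.length).map
          (fun j => if row.getD j 0 ≠ 0 ∧ (((j : Nat) : Int) ∉ b) then row.getD j 0 else 0)).sum := by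
    rw [pvRowSum_eq_sum row 0 b]
    congr 1
    apply List.map_congr_left
    intro j _
    simp
  rw [h0]
  obtain ⟨m, rfl⟩ := Nat.exists_eq_add_of_le hW
  rw [List.range_add, List.map_append, List.sum_append, List.map_map]
  have : ∀ x ∈ List.range m,
      ((fun j => if row.getD j 0 ≠ 0 ∧ (((j : Nat) : Int) ∉ b) then row.getD j 0 else 0) ∘
        (fun x => row.length + x)) x = 0 := by
    intro x _
    simp only [Function.comp]
    rw [List.getD_eq_default row 0 (by omega)]
    simp
  rw [List.map_congr_left this]
  simp

-- pvColSum's accumulator splits off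
theorem pvColSum_acc (rows : List (List Int)) (j : Nat) (s : Int) :
    pvColSum rows j s = s + pvColSum rows j 0 := by
  induction rows generalizing s with
  | nil => simp [pvColSum]
  | cons row rest ih =>
      by_cases h : j < row.length
      · by_cases h0 : row[j] = 0
        · simp [pvColSum, h, h0]
        · simp only [pvColSum, dif_pos h, if_neg h0]
          rw [ih (s + row[j]), ih (0 + row[j])]
          ring
      · simp only [pvColSum, dif_neg h]
        exact ih s

-- the row/column exchange: A's row-structural total equals the column sums
theorem pvTotal_eq_colSums (rows : List (List Int)) (b : List Int) (W : Nat)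
    (hW : ∀ r ∈ rows, r.length ≤ W) :
    pvTotal b rows
    = ((List.range W).map (fun j => if ((j : Nat) : Int) ∈ b then 0 else pvColSum rows j 0)).sum := by
  induction rows generalizing b with
  | nil =>
      have : ∀ j ∈ List.range W,
          (if ((j : Nat) : Int) ∈ b then (0 : Int) else pvColSum [] j 0) = 0 := by
        intro j _; simp [pvColSum]
      simp only [pvTotal]
      rw [List.map_congr_left this]
      simp
  | cons row rest ih =>
      simp only [pvTotal]
      rw [pvRowSum_eq_sum_W row b W (hW row (by simp)),
        ih (b ++ pvRowBans row 0) (fun r hr => hW r (by simp [hr])),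
        ← PySem.List.sum_map_add_int]
      congr 1
      apply List.map_congr_left
      intro j _
      have hbans : (((j : Nat) : Int) ∈ pvRowBans row 0) ↔ (j < row.length ∧ row.getD j 0 = 0) := by
        simpa using mem_pvRowBans row 0 j
      by_cases hb : ((j : Nat) : Int) ∈ b
      · simp [hb, List.mem_append]
      · by_cases hj : j < row.length
        · have hgd : row.getD j 0 = row[j] := List.getD_eq_getElem row 0 hj
          by_cases h0 : row[j] = 0
          · simp [hb, hj, h0, List.mem_append, hbans, pvColSum]
          · have : ¬ (((j : Nat) : Int) ∈ b ++ pvRowBans row 0) := by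
              simp [List.mem_append, hb, hbans, hj, h0]
            simp only [if_neg hb, if_neg this, hgd, if_pos (And.intro h0 hb)]
            simp only [pvColSum, dif_pos hj, if_neg h0]
            rw [pvColSum_acc rest j ((0 : Int) + row[j])]
            ring
        · have hgd : row.getD j 0 = 0 := List.getD_eq_default row 0 (by omega)
          have : ¬ (((j : Nat) : Int) ∈ b ++ pvRowBans row 0) := by
            simp [List.mem_append, hb, hbans, hj]
          simp [hb, this, pvColSum, hj]

-- A's outer fold extracts its running sum as pvTotal
theorem pvFold_eq_total (rows : List (List Int)) (s : Int) (b : List Int) :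
    (rows.foldl (fun st row => pvInner row 0 st) (s, b)).1 = s + pvTotal b rows := by
  induction rows generalizing s b with
  | nil => simp [pvTotal]
  | cons row rest ih =>
      simp only [List.foldl_cons, pvInner_eq, pvTotal, ih, add_assoc]

-- the ported A is the fold of pvInner over the rows
theorem portA_eq (matrix : List (List Int)) :
    matrixElementsSum matrix
    = (matrix.foldl (fun st row => pvInner row 0 st) ((0 : Int), ([] : List Int))).1 := by
  unfold matrixElementsSum
  rw [PySem.List.foldl_pyRange_zero_pyGetD' matrix ([] : List Int)
    (fun st row =>
      (PySem.List.pyRange 0 (row.length : Int) 1).foldl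
        (fun (st : Int × List Int) j =>
          let v := PySem.List.pyGetD row j 0
          if v = 0 then (st.1, st.2 ++ [j])
          else if j ∉ st.2 then (st.1 + v, st.2)
          else st)
        st) ((0 : Int), ([] : List Int))]
  congr 1
  refine PySem.List.foldl_congr_mem _ _ _ _ ?_
  intro st row _
  rw [PySem.List.pyRange_one 0 (row.length : Int), List.foldl_map]
  rw [← pvRangeFold_eq_pvInner row 0 st]
  have hlen : ((row.length : Int) - 0).toNat = row.length := by omega
  rw [hlen]
  refine PySem.List.foldl_congr_mem _ _ _ _ ?_
  intro acc k _
  simp [pvBody, PySem.List.pyGetD_natCast]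

-- ===== VERDICT (by name: the statement is the Claim_ definition above) =====
theorem matrixElementsSum_spec : Claim_equal_matrixElementsSum := by
  intro matrix _
  unfold Spec_matrixElementsSum matrixElementsSum_alt
  rw [portA_eq, pvFold_eq_total, zero_add]
  rw [pvTotal_eq_colSums matrix [] (matrix.foldl (fun w row => max w row.length) 0)
    (fun r hr => (PySem.List.le_foldl_max_nat matrix List.length 0).2 r hr)]
  simp
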